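-- pv_equiv track=rewrite | github.com/chrisarseno/nexus | src/nexus/rag/context_window_manager.py | _find_semantic_boundaries
-- ===== SOURCE A (Python) =====
-- def _find_semantic_boundaries(content_str):
--     """Find semantic boundaries in text."""
--     # Simple sentence-based boundaries
--     sentences = content_str.split('.')
--     boundaries = []
--     start = 0
--     for sentence in sentences:
--         end = start + len(sentence) + 1  # +1 for the period
--         if end <= len(content_str):
--             boundaries.append((start, end))
--         start = end
--     return boundaries if boundaries else [(0, len(content_str))]
-- ===== SOURCE B (Python) =====
-- def _find_semantic_boundaries(content_str):
--     """Find semantic boundaries in text (staged: collect cut points, then zip consecutive ones)."""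
--     cuts = [i + 1 for i, c in enumerate(content_str) if c == '.']
--     boundaries = list(zip([0] + cuts, cuts))
--     return boundaries if boundaries else [(0, len(content_str))]
-- ===== Notes on version B (the rewrite author's own statement) =====
-- stated objective: alternative
-- what changed: B replaces A's split-on-period fold with running start and end-within-length guard by two staged passes: collect the post-period cut indices, then zip each cut with its predecessor (0-prefixed) to form the ranges.
import Mathlib
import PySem

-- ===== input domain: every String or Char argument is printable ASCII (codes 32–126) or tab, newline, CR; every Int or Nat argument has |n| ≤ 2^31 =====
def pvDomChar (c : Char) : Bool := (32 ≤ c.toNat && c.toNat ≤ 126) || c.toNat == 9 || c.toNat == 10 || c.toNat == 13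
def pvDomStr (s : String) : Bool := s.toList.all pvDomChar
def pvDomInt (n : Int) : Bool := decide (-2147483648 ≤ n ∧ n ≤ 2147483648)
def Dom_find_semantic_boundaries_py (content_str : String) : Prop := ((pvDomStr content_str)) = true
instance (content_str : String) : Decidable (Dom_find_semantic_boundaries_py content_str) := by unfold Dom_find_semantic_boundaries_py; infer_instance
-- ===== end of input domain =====

-- B replaces A's split-on-period fold by two staged passes: collect post-period cut indices, then zip them with their 0-prefixed predecessors.

-- ===== PORT A =====
-- A: sentences = content_str.split('.'); accumulate (start, end) with end = start+len+1, keep if end <= len(content_str).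
def find_semantic_boundaries_py (content_str : String) : List (Int × Int) :=
  let s := content_str.toList
  let sentences := PySem.Chars.splitOn s ['.']
  let res := sentences.foldl
    (fun (st : List (Int × Int) × Int) (sentence : List Char) =>
      let e := st.2 + (sentence.length : Int) + 1
      ((if e ≤ (s.length : Int) then st.1 ++ [(st.2, e)] else st.1), e))
    ([], 0)
  if res.1 = [] then [((0 : Int), (s.length : Int))] else res.1

-- ===== PORT B =====
-- B: cuts = [i+1 for i,c in enumerate(s) if c=='.']; boundaries = zip([0]+cuts, cuts).
def find_semantic_boundaries_py_alt (content_str : String) : List (Int × Int) :=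
  let s := content_str.toList
  let cuts := ((PySem.List.enumerate s).filter (fun ic => ic.2 = '.')).map (fun ic => ic.1 + 1)
  let boundaries := List.zip ((0 : Int) :: cuts) cuts
  if boundaries = [] then [((0 : Int), (s.length : Int))] else boundaries

-- ===== PRECONDITION & SPEC =====
def Spec_find_semantic_boundaries_py (content_str : String) (out : List (Int × Int)) : Prop := out = find_semantic_boundaries_py_alt content_str
instance (content_str : String) (out : List (Int × Int)) : Decidable (Spec_find_semantic_boundaries_py content_str out) := by unfold Spec_find_semantic_boundaries_py; infer_instance

-- ===== CLAIM (what is proved, stated in full; the proofs are below) =====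
def Claim_equal_find_semantic_boundaries_py : Prop := ∀ (content_str : String), Dom_find_semantic_boundaries_py content_str → Spec_find_semantic_boundaries_py content_str (find_semantic_boundaries_py content_str)

-- ===== LEMMAS AND PROOFS =====

-- Reference scan A's fold is reduced to: boundaries and final start, scanning t whose
-- first char sits at absolute index i, with the current sentence having started at `start`.
def pvScan : List Char → Int → Int → List (Int × Int) × Int
  | [], _, start => ([], start)
  | c :: t, i, start =>
    if c = '.' then
      let r := pvScan t (i + 1) (i + 1)
      ((start, i + 1) :: r.1, r.2)
    else pvScan t (i + 1) start

-- The cut points (index-after-period), scanning t from absolute index i.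
def pvCuts : List Char → Int → List Int
  | [], _ => []
  | c :: t, i => if c = '.' then (i + 1) :: pvCuts t (i + 1) else pvCuts t (i + 1)

-- splitOn with separator "." as a structural recursion.
def pvSplitDot : List Char → List (List Char)
  | [] => [[]]
  | c :: t => if c = '.' then [] :: pvSplitDot t else (pvSplitDot t).modifyHead (c :: ·)

theorem pvSplitDot_ne_nil (t : List Char) : pvSplitDot t ≠ [] := by
  induction t with
  | nil => simp [pvSplitDot]
  | cons c t ih =>
    simp only [pvSplitDot]; split_ifs
    · simp
    · cases h : pvSplitDot t <;> simp_all [List.modifyHead]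

theorem pvSplitOn_go_spec : ∀ (fuel : Nat) (l : List Char) (cur : List Char) (acc : List (List Char)),
    l.length < fuel →
    PySem.Chars.splitOn.go ['.'] fuel l cur acc
      = acc.reverse ++ (pvSplitDot l).modifyHead (cur.reverse ++ ·) := by
  intro fuel
  induction fuel with
  | zero => intro l cur acc h; omega
  | succ n ih =>
    intro l cur acc h
    cases l with
    | nil => simp [PySem.Chars.splitOn.go, pvSplitDot, List.modifyHead]
    | cons c rest =>
      rw [PySem.Chars.splitOn.go]
      by_cases hc : c = '.'
      · subst hc
        have hp : List.isPrefixOf ['.'] ('.' :: rest) = true := by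
          simp
        simp only [hp, if_pos]
        rw [ih _ _ _ (by simpa using Nat.lt_of_succ_lt_succ h)]
        rcases hsd : pvSplitDot rest with _ | ⟨p, ps⟩
        · exact absurd hsd (pvSplitDot_ne_nil rest)
        · simp [pvSplitDot, hsd, List.modifyHead]
      · have hp : List.isPrefixOf ['.'] (c :: rest) = false := by
          rw [Bool.eq_false_iff]
          intro h'
          rw [List.isPrefixOf_iff_prefix, List.cons_prefix_cons] at h'
          exact hc h'.1.symm
        simp only [hp, Bool.false_eq_true, if_neg, not_false_iff]
        rw [ih _ _ _ (by simpa using Nat.lt_of_succ_lt_succ h)]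
        rcases hsd : pvSplitDot rest with _ | ⟨p, ps⟩
        · exact absurd hsd (pvSplitDot_ne_nil rest)
        · simp [pvSplitDot, hc, hsd, List.modifyHead]

theorem pvSplitOn_eq_pvSplitDot (s : List Char) :
    PySem.Chars.splitOn s ['.'] = pvSplitDot s := by
  rw [PySem.Chars.splitOn, pvSplitOn_go_spec _ _ _ _ (by omega)]
  rcases h : pvSplitDot s with _ | ⟨p, ps⟩
  · exact absurd h (pvSplitDot_ne_nil s)
  · simp [List.modifyHead]

theorem pvModifyHead_modifyHead {α : Type} (l : List α) (f g : α → α) :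
    (l.modifyHead g).modifyHead f = l.modifyHead (fun x => f (g x)) := by
  cases l <;> simp [List.modifyHead]

-- A's fold over the split pieces (with the head piece extended by `cur`) equals pvScan.
theorem pvFoldA : ∀ (t : List Char) (N i : Nat) (start : Int) (cur : List Char) (bnd : List (Int × Int)),
    i + t.length = N → start + (cur.length : Int) = (i : Int) →
    ((pvSplitDot t).modifyHead (cur ++ ·)).foldl
        (fun (st : List (Int × Int) × Int) (sentence : List Char) =>
          ((if st.2 + (sentence.length : Int) + 1 ≤ (N : Int)
              then st.1 ++ [(st.2, st.2 + (sentence.length : Int) + 1)] else st.1),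
            st.2 + (sentence.length : Int) + 1))
        (bnd, start)
      = (bnd ++ (pvScan t (i : Int) start).1, (N : Int) + 1) := by
  intro t
  induction t with
  | nil =>
    intro N i start cur bnd hN hs
    simp only [pvSplitDot, List.modifyHead]
    rw [List.foldl_cons, List.foldl_nil]
    simp only [List.length_nil] at hN
    have hcond : ¬ (start + ((cur ++ []).length : Int) + 1 ≤ (N : Int)) := by
      simp; omega
    rw [if_neg hcond]
    simp only [pvScan, List.append_nil]
    refine Prod.ext ?_ ?_
    · simp
    · simp; omega
  | cons c t ih =>
    intro N i start cur bnd hN hs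
    simp only [List.length_cons] at hN
    simp only [pvSplitDot]
    by_cases hc : c = '.'
    · simp only [hc, ite_true, List.modifyHead]
      rw [List.foldl_cons]
      simp only []
      have hcond : start + ((cur ++ []).length : Int) + 1 ≤ (N : Int) := by
        simp; omega
      rw [if_pos hcond]
      have h1 : (pvSplitDot t) = (pvSplitDot t).modifyHead (([] : List Char) ++ ·) := by
        cases h : pvSplitDot t <;> simp [List.modifyHead]
      have hih := ih N (i + 1) (start + ((cur ++ []).length : Int) + 1) []
        (bnd ++ [(start, start + ((cur ++ []).length : Int) + 1)]) (by omega)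
        (by simp; omega)
      rw [h1, hih]
      have hstart : start + ((cur ++ []).length : Int) + 1 = (i : Int) + 1 := by
        simp at hs ⊢; omega
      rw [hstart]
      simp only [pvScan, ite_true]
      push_cast
      simp
    · simp only [hc, ite_false]
      rw [pvModifyHead_modifyHead]
      have h2 : ((pvSplitDot t).modifyHead fun x => cur ++ c :: x)
          = (pvSplitDot t).modifyHead (fun x => (cur ++ [c]) ++ x) := by
        congr 1; funext x; simp
      have hih := ih N (i + 1) start (cur ++ [c]) bnd (by omega)
        (by simp; omega)
      rw [h2, hih]
      simp only [pvScan, hc, ite_false]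
      push_cast
      simp

-- pvScan's boundary list is the zip of the cut list with its start-prefixed predecessors.
theorem pvScan_eq_zip : ∀ (t : List Char) (i start : Int),
    (pvScan t i start).1 = List.zip (start :: pvCuts t i) (pvCuts t i) := by
  intro t
  induction t with
  | nil => intro i start; simp [pvScan, pvCuts]
  | cons c t ih =>
    intro i start
    by_cases hc : c = '.'
    · simp [pvScan, pvCuts, hc, ih]
    · simp [pvScan, pvCuts, hc, ih]

-- B's filter/map over enumerate computes pvCuts.
theorem pvCuts_eq_filterMap : ∀ (t : List Char) (i : Int),
    ((PySem.List.enumerate t i).filter (fun ic => ic.2 = '.')).map (fun ic => ic.1 + 1)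
      = pvCuts t i := by
  intro t
  induction t with
  | nil => intro i; simp [PySem.List.enumerate_nil, pvCuts]
  | cons c t ih =>
    intro i
    rw [PySem.List.enumerate_cons]
    by_cases hc : c = '.'
    · simp [List.filter, pvCuts, hc, ih]
    · simp [List.filter, pvCuts, hc, ih]

-- ===== VERDICT (by name: the statement is the Claim_ definition above) =====
theorem find_semantic_boundaries_py_spec : Claim_equal_find_semantic_boundaries_py := by
  unfold Claim_equal_find_semantic_boundaries_py
  intro content_str _
  unfold Spec_find_semantic_boundaries_py
  unfold find_semantic_boundaries_py find_semantic_boundaries_py_alt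
  simp only []
  rw [pvSplitOn_eq_pvSplitDot]
  have h1 : (pvSplitDot content_str.toList)
      = (pvSplitDot content_str.toList).modifyHead (([] : List Char) ++ ·) := by
    cases h : pvSplitDot content_str.toList <;> simp [List.modifyHead]
  rw [h1, pvFoldA content_str.toList content_str.toList.length 0 0 [] [] (by simp) (by simp)]
  rw [pvCuts_eq_filterMap]
  simp [pvScan_eq_zip]
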